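-- pv_equiv track=rewrite | github.com/CarlmanPaulus/HydroS-Pro | manual_extractor/main_window.py | build_light_stylesheet
-- ===== SOURCE A (Python) =====
-- def build_light_stylesheet(base_stylesheet):
--     replacements = [
--         ("#ff6ec7", "#b13c86"),
--         ("#ff9bd5", "#b13c86"),
--         ("#b8ffda", "#176248"),
--         ("#113427", "#e0f6eb"),
--         ("#1f7f58", "#7dc5a4"),
--         ("#ffe2b0", "#8d5d16"),
--         ("#3a2a10", "#fff1d9"),
--         ("#9a6b21", "#dfb15c"),
--         ("#dff7ff", "#0a6080"),
--         ("#f0c8a8", "#7a5538"),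
--         ("#e8a87c", "#8a6040"),
--         ("#45dcf8", "#0088aa"),
--         ("#00f0a0", "#0d986b"),
--         ("#00d78d", "#1da878"),
--         ("#1c3348", "#e4eff7"),
--         ("#1e3650", "#dae9f3"),
--         ("#0f1923", "#edf3f8"),
--         ("#09131d", "#ffffff"),
--         ("#162230", "#ffffff"),
--         ("#17283a", "#dce8f1"),
--         ("#1a2d3d", "#edf4f9"),
--         ("#1b3d53", "#bcd7e7"),
--         ("#1c2e3f", "#f7fbff"),
--         ("#21384b", "#d5e5f0"),
--         ("#243646", "#d6e2ea"),
--         ("#24465f", "#dcecf7"),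
--         ("#253545", "#c4d4e0"),
--         ("#29425a", "#c9d8e5"),
--         ("#2a4055", "#c9d8e5"),
--         ("#2d5776", "#c7deee"),
--         ("#31465a", "#bccbd7"),
--         ("#3a5068", "#a9becf"),
--         ("#47617b", "#8ca6b9"),
--         ("#4a6a88", "#96aec2"),
--         ("#4c6987", "#9eb4c7"),
--         ("#6f8598", "#5f7382"),
--         ("#728aa1", "#3f586a"),
--         ("#8fa8be", "#486173"),
--         ("#c8d6e2", "#244052"),
--         ("#cde8f5", "#1f455c"),
--         ("#d4dce6", "#183548"),
--         ("#122133", "#f7fbff"),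
--         ("#152a3a", "#edf5fa"),
--     ]
--
--     light_stylesheet = base_stylesheet
--     for old, new in replacements:
--         light_stylesheet = light_stylesheet.replace(old, new)
--     return light_stylesheet
-- ===== SOURCE B (Python) =====
-- # One left-to-right scan: decode each "#rrggbb" token after '#' into a 24-bit int,
-- # look it up in an int->int color map, and re-encode the light color as hex digits.
--
-- _MAP = {
--     0xff6ec7: 0xb13c86, 0xff9bd5: 0xb13c86, 0xb8ffda: 0x176248,
--     0x113427: 0xe0f6eb, 0x1f7f58: 0x7dc5a4, 0xffe2b0: 0x8d5d16,
--     0x3a2a10: 0xfff1d9, 0x9a6b21: 0xdfb15c, 0xdff7ff: 0x0a6080,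
--     0xf0c8a8: 0x7a5538, 0xe8a87c: 0x8a6040, 0x45dcf8: 0x0088aa,
--     0x00f0a0: 0x0d986b, 0x00d78d: 0x1da878, 0x1c3348: 0xe4eff7,
--     0x1e3650: 0xdae9f3, 0x0f1923: 0xedf3f8, 0x09131d: 0xffffff,
--     0x162230: 0xffffff, 0x17283a: 0xdce8f1, 0x1a2d3d: 0xedf4f9,
--     0x1b3d53: 0xbcd7e7, 0x1c2e3f: 0xf7fbff, 0x21384b: 0xd5e5f0,
--     0x243646: 0xd6e2ea, 0x24465f: 0xdcecf7, 0x253545: 0xc4d4e0,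
--     0x29425a: 0xc9d8e5, 0x2a4055: 0xc9d8e5, 0x2d5776: 0xc7deee,
--     0x31465a: 0xbccbd7, 0x3a5068: 0xa9becf, 0x47617b: 0x8ca6b9,
--     0x4a6a88: 0x96aec2, 0x4c6987: 0x9eb4c7, 0x6f8598: 0x5f7382,
--     0x728aa1: 0x3f586a, 0x8fa8be: 0x486173, 0xc8d6e2: 0x244052,
--     0xcde8f5: 0x1f455c, 0xd4dce6: 0x183548, 0x122133: 0xf7fbff,
--     0x152a3a: 0xedf5fa,
-- }
--
-- # lowercase hex digits only: A's str.replace is case-sensitive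
-- _DIG = {'0': 0, '1': 1, '2': 2, '3': 3, '4': 4, '5': 5, '6': 6, '7': 7,
--         '8': 8, '9': 9, 'a': 10, 'b': 11, 'c': 12, 'd': 13, 'e': 14, 'f': 15}
-- _CHR = "0123456789abcdef"
--
--
-- def build_light_stylesheet(base_stylesheet):
--     s = base_stylesheet
--     out = []
--     i = 0
--     n = len(s)
--     while i < n:
--         if s[i] == '#':
--             ds = [_DIG.get(c) for c in s[i + 1:i + 7]]
--             if len(ds) == 6 and None not in ds:
--                 val = ((((ds[0] * 16 + ds[1]) * 16 + ds[2]) * 16 + ds[3]) * 16 + ds[4]) * 16 + ds[5]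
--                 w = _MAP.get(val)
--                 if w is not None:
--                     out.append('#' + _CHR[w // 1048576 % 16] + _CHR[w // 65536 % 16]
--                                + _CHR[w // 4096 % 16] + _CHR[w // 256 % 16]
--                                + _CHR[w // 16 % 16] + _CHR[w % 16])
--                     i += 7
--                     continue
--         out.append(s[i])
--         i += 1
--     return ''.join(out)
-- ===== Notes on version B (the rewrite author's own statement) =====
-- stated objective: alternative
-- what changed: Replaces A's 43 sequential full-string str.replace passes with a single left-to-right scan that decodes each candidate 7-character color token to a 24-bit integer, looks it up in an int-to-int color map, and re-encodes the replacement as hex digits.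
import Mathlib
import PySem

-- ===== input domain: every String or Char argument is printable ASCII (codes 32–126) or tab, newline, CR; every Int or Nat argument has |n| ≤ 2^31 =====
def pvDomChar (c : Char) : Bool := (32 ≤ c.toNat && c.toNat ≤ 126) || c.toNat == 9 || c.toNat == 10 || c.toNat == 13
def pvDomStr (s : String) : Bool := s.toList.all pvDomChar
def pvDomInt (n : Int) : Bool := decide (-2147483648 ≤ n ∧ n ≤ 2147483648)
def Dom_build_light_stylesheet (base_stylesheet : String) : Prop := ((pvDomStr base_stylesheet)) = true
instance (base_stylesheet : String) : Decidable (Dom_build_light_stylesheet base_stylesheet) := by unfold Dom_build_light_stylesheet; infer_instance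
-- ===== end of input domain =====

-- B replaces A's 43 sequential full-string replace passes by one left-to-right scan that
-- decodes each '#rrggbb' token to a 24-bit integer, looks it up in an int->int map and
-- re-encodes the light color (objective: alternative single-pass algorithm).

-- ===== PORT A =====
def pvReplacements : List (String × String) :=
  [ ("#ff6ec7", "#b13c86"), ("#ff9bd5", "#b13c86"), ("#b8ffda", "#176248"),
    ("#113427", "#e0f6eb"), ("#1f7f58", "#7dc5a4"), ("#ffe2b0", "#8d5d16"),
    ("#3a2a10", "#fff1d9"), ("#9a6b21", "#dfb15c"), ("#dff7ff", "#0a6080"),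
    ("#f0c8a8", "#7a5538"), ("#e8a87c", "#8a6040"), ("#45dcf8", "#0088aa"),
    ("#00f0a0", "#0d986b"), ("#00d78d", "#1da878"), ("#1c3348", "#e4eff7"),
    ("#1e3650", "#dae9f3"), ("#0f1923", "#edf3f8"), ("#09131d", "#ffffff"),
    ("#162230", "#ffffff"), ("#17283a", "#dce8f1"), ("#1a2d3d", "#edf4f9"),
    ("#1b3d53", "#bcd7e7"), ("#1c2e3f", "#f7fbff"), ("#21384b", "#d5e5f0"),
    ("#243646", "#d6e2ea"), ("#24465f", "#dcecf7"), ("#253545", "#c4d4e0"),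
    ("#29425a", "#c9d8e5"), ("#2a4055", "#c9d8e5"), ("#2d5776", "#c7deee"),
    ("#31465a", "#bccbd7"), ("#3a5068", "#a9becf"), ("#47617b", "#8ca6b9"),
    ("#4a6a88", "#96aec2"), ("#4c6987", "#9eb4c7"), ("#6f8598", "#5f7382"),
    ("#728aa1", "#3f586a"), ("#8fa8be", "#486173"), ("#c8d6e2", "#244052"),
    ("#cde8f5", "#1f455c"), ("#d4dce6", "#183548"), ("#122133", "#f7fbff"),
    ("#152a3a", "#edf5fa") ]

def build_light_stylesheet (base_stylesheet : String) : String :=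
  pvReplacements.foldl (fun light p => PySem.Str.replace light p.1 p.2) base_stylesheet

-- ===== PORT B =====
-- Source B's _MAP: dark color -> light color as 24-bit integers
def pvNumMap : List (Nat × Nat) :=
  [ (0xff6ec7, 0xb13c86), (0xff9bd5, 0xb13c86), (0xb8ffda, 0x176248),
    (0x113427, 0xe0f6eb), (0x1f7f58, 0x7dc5a4), (0xffe2b0, 0x8d5d16),
    (0x3a2a10, 0xfff1d9), (0x9a6b21, 0xdfb15c), (0xdff7ff, 0x0a6080),
    (0xf0c8a8, 0x7a5538), (0xe8a87c, 0x8a6040), (0x45dcf8, 0x0088aa),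
    (0x00f0a0, 0x0d986b), (0x00d78d, 0x1da878), (0x1c3348, 0xe4eff7),
    (0x1e3650, 0xdae9f3), (0x0f1923, 0xedf3f8), (0x09131d, 0xffffff),
    (0x162230, 0xffffff), (0x17283a, 0xdce8f1), (0x1a2d3d, 0xedf4f9),
    (0x1b3d53, 0xbcd7e7), (0x1c2e3f, 0xf7fbff), (0x21384b, 0xd5e5f0),
    (0x243646, 0xd6e2ea), (0x24465f, 0xdcecf7), (0x253545, 0xc4d4e0),
    (0x29425a, 0xc9d8e5), (0x2a4055, 0xc9d8e5), (0x2d5776, 0xc7deee),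
    (0x31465a, 0xbccbd7), (0x3a5068, 0xa9becf), (0x47617b, 0x8ca6b9),
    (0x4a6a88, 0x96aec2), (0x4c6987, 0x9eb4c7), (0x6f8598, 0x5f7382),
    (0x728aa1, 0x3f586a), (0x8fa8be, 0x486173), (0xc8d6e2, 0x244052),
    (0xcde8f5, 0x1f455c), (0xd4dce6, 0x183548), (0x122133, 0xf7fbff),
    (0x152a3a, 0xedf5fa) ]

def pvNumTable : PySem.Dict Nat Nat := PySem.Dict.mk pvNumMap

-- Source B's _DIG.get(c): literal dict lookup, rendered as a literal match (exact; lowercase only)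
def pvHexVal? (c : Char) : Option Nat :=
  match c with
  | '0' => some 0 | '1' => some 1 | '2' => some 2 | '3' => some 3
  | '4' => some 4 | '5' => some 5 | '6' => some 6 | '7' => some 7
  | '8' => some 8 | '9' => some 9 | 'a' => some 10 | 'b' => some 11
  | 'c' => some 12 | 'd' => some 13 | 'e' => some 14 | 'f' => some 15
  | _ => none

-- Source B's _CHR[d] for d < 16: literal string indexing, rendered as a literal match (exact)
def pvHexChr (d : Nat) : Char :=
  match d with
  | 0 => '0' | 1 => '1' | 2 => '2' | 3 => '3' | 4 => '4' | 5 => '5'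
  | 6 => '6' | 7 => '7' | 8 => '8' | 9 => '9' | 10 => 'a' | 11 => 'b'
  | 12 => 'c' | 13 => 'd' | 14 => 'e' | 15 => 'f' | _ => '?'

-- Source B: the six _DIG lookups on s[i+1:i+7] and the accumulated value (fails unless 6 hex digits)
def pvParse6 (l : List Char) : Option Nat :=
  match l with
  | [a, b, c, d, e, f] =>
    match pvHexVal? a, pvHexVal? b, pvHexVal? c, pvHexVal? d, pvHexVal? e, pvHexVal? f with
    | some a', some b', some c', some d', some e', some f' =>
      some (((((a' * 16 + b') * 16 + c') * 16 + d') * 16 + e') * 16 + f')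
    | _, _, _, _, _, _ => none
  | _ => none

-- Source B: '#' + the six _CHR digits of w
def pvFmt6 (w : Nat) : List Char :=
  [pvHexChr (w / 1048576 % 16), pvHexChr (w / 65536 % 16), pvHexChr (w / 4096 % 16),
   pvHexChr (w / 256 % 16), pvHexChr (w / 16 % 16), pvHexChr (w % 16)]

-- Source B's while loop as recursion on the remaining suffix
def pvScanB : List Char → List Char
  | [] => []
  | c :: t =>
    if c = '#' then
      match pvParse6 (t.take 6) with
      | some v =>
        match PySem.Dict.get? pvNumTable v with
        | some w => ('#' :: pvFmt6 w) ++ pvScanB (t.drop 6)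
        | none => c :: pvScanB t
      | none => c :: pvScanB t
    else c :: pvScanB t
termination_by s => s.length
decreasing_by
  all_goals simp

def build_light_stylesheet_alt (base_stylesheet : String) : String :=
  String.ofList (pvScanB base_stylesheet.toList)

-- ===== PRECONDITION & SPEC =====
def Spec_build_light_stylesheet (base_stylesheet : String) (out : String) : Prop := out = build_light_stylesheet_alt base_stylesheet
instance (base_stylesheet : String) (out : String) : Decidable (Spec_build_light_stylesheet base_stylesheet out) := by unfold Spec_build_light_stylesheet; infer_instance

-- ===== CLAIM (what is proved, stated in full; the proofs are below) =====
def Claim_equal_build_light_stylesheet : Prop := ∀ (base_stylesheet : String), Dom_build_light_stylesheet base_stylesheet → Spec_build_light_stylesheet base_stylesheet (build_light_stylesheet base_stylesheet)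

-- ===== LEMMAS AND PROOFS =====

-- proof-side view of A's table at the List Char level, and as a dict
def pvT : List (List Char × List Char) := pvReplacements.map (fun p => (p.1.toList, p.2.toList))

def pvKeys : List (List Char) := pvT.map Prod.fst

def pvTableB : PySem.Dict (List Char) (List Char) := PySem.Dict.mk pvT

-- a 7-char "#rrggbb" token: length 7, leading '#', no interior '#'
def pvTok (p : List Char) : Prop := p.length = 7 ∧ p.head? = some '#' ∧ ∀ a ∈ p.tail, a ≠ '#'

-- structural characterisation of Python's str.replace with a nonempty pattern
def rep (o n : List Char) : List Char → List Char
  | [] => []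
  | c :: t =>
    if o.isPrefixOf (c :: t) then n ++ rep o n (t.drop (o.length - 1))
    else c :: rep o n t
termination_by s => s.length
decreasing_by
  · simp
  · simp

theorem go_eq (o n : List Char) (ho : o ≠ []) :
    ∀ fuel l acc, l.length ≤ fuel →
      PySem.Chars.replace.go o n fuel l acc = acc.reverse ++ rep o n l := by
  have ho' : 0 < o.length := List.length_pos_iff.mpr ho
  intro fuel
  induction fuel with
  | zero =>
    intro l acc h
    have : l = [] := List.eq_nil_of_length_eq_zero (by omega)
    subst this
    simp [PySem.Chars.replace.go, rep]
  | succ f ih =>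
    intro l acc h
    cases l with
    | nil => simp [PySem.Chars.replace.go, rep]
    | cons c t =>
      rw [PySem.Chars.replace.go]
      simp only [List.length_cons] at h
      by_cases hp : o.isPrefixOf (c :: t)
      · simp only [hp, if_true]
        obtain ⟨k, hk⟩ : ∃ k, o.length = k + 1 := ⟨o.length - 1, by omega⟩
        rw [hk, List.drop_succ_cons, ih _ _ (by have := List.length_drop (l := t) (i := k); omega)]
        rw [rep]
        simp [hp, hk]
      · simp only [hp, Bool.false_eq_true, if_false]
        rw [ih _ _ (by omega), rep]
        simp [hp]

theorem replace_eq_rep (o n : List Char) (ho : o ≠ []) (s : List Char) :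
    PySem.Chars.replace s o n = rep o n s := by
  rw [PySem.Chars.replace]
  simp [List.isEmpty_iff, ho, go_eq o n ho s.length s []]

-- rep equations
theorem rep_nil (o n : List Char) : rep o n [] = [] := by simp [rep]

theorem rep_skip (o n : List Char) (c : Char) (t : List Char) (h : ¬ o <+: (c :: t)) :
    rep o n (c :: t) = c :: rep o n t := by
  rw [rep]
  simp [List.isPrefixOf_iff_prefix, h]

theorem rep_hit (o n : List Char) (ho : o ≠ []) (t : List Char) :
    rep o n (o ++ t) = n ++ rep o n t := by
  obtain ⟨c, or, rfl⟩ : ∃ c or, o = c :: or := by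
    cases o with
    | nil => exact absurd rfl ho
    | cons c or => exact ⟨c, or, rfl⟩
  rw [List.cons_append, rep]
  simp [List.isPrefixOf_iff_prefix, List.prefix_append]

-- token shape helpers
theorem tok_cons (p : List Char) (hp : pvTok p) :
    ∃ pr, p = '#' :: pr ∧ pr.length = 6 ∧ ∀ a ∈ pr, a ≠ '#' := by
  obtain ⟨h1, h2, h3⟩ := hp
  cases p with
  | nil => simp at h2
  | cons c pr =>
    simp only [List.head?_cons, Option.some.injEq] at h2
    exact ⟨pr, by rw [h2], by simpa using h1, by simpa using h3⟩

-- a prefix of matching length of x ++ u is x itself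
theorem prefix_append_same_length {x u p : List Char} (h : p <+: x ++ u)
    (hl : p.length = x.length) : p = x := by
  rw [List.prefix_iff_eq_take] at h
  rw [h, hl, List.take_left' rfl]

-- rep skips over a block of non-'#' characters (the pattern starts with '#')
theorem rep_skip_block (o n : List Char) (ho : o.head? = some '#') :
    ∀ y u, (∀ a ∈ y, a ≠ '#') → rep o n (y ++ u) = y ++ rep o n u := by
  intro y
  induction y with
  | nil => intro u _; simp
  | cons a y ih =>
    intro u hy
    have hnp : ¬ o <+: (a :: (y ++ u)) := by
      intro hpre
      obtain ⟨t', ht'⟩ := hpre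
      cases o with
      | nil => simp at ho
      | cons oh ot =>
        simp only [List.head?_cons, Option.some.injEq] at ho
        have : oh = a := by simpa using congrArg List.head? ht'
        exact hy a (by simp) (by rw [← this, ho])
    rw [List.cons_append, rep_skip o n a (y ++ u) hnp, ih u (fun a ha => hy a (by simp [ha]))]
    simp

-- rep distributes over a leading token distinct from the pattern
theorem rep_token_prefix (o n x : List Char) (ho : pvTok o) (hx : pvTok x) (hne : o ≠ x)
    (u : List Char) : rep o n (x ++ u) = x ++ rep o n u := by
  obtain ⟨xr, hxeq, hxl, hxh⟩ := tok_cons x hx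
  have hnp : ¬ o <+: (x ++ u) := by
    intro hpre
    exact hne (prefix_append_same_length hpre (by rw [ho.1, hx.1]))
  subst hxeq
  rw [List.cons_append, rep_skip o n _ _ (by rwa [← List.cons_append]),
    rep_skip_block o n ho.2.1 xr u hxh]
  simp

-- '#'-mask invariance: replacement of one 7-token by another preserves '#' positions
theorem tok_mask (p : List Char) (hp : pvTok p) :
    p.map (fun a => decide (a = '#')) = true :: List.replicate 6 false := by
  obtain ⟨pr, rfl, hl, hh⟩ := tok_cons p hp
  rw [List.map_cons]
  refine List.cons_eq_cons.mpr ⟨by decide, List.eq_replicate_iff.mpr ⟨by simpa using hl, ?_⟩⟩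
  intro b hb
  obtain ⟨a, ha, rfl⟩ := List.mem_map.mp hb
  simp [hh a ha]

theorem rep_mask (o n : List Char) (ho : pvTok o) (hn : pvTok n) (t : List Char) :
    (rep o n t).map (fun a => decide (a = '#')) = t.map (fun a => decide (a = '#')) := by
  induction t using rep.induct o with
  | case1 => simp [rep_nil]
  | case2 c t hp ih =>
    have hpre : o <+: c :: t := List.isPrefixOf_iff_prefix.mp hp
    obtain ⟨u, hu⟩ := hpre
    have ho' : o ≠ [] := by intro h; have h7 := ho.1; rw [h] at h7; simp at h7
    obtain ⟨oh, ot, rfl⟩ : ∃ oh ot, o = oh :: ot := by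
      cases o with
      | nil => exact absurd rfl ho'
      | cons a b => exact ⟨a, b, rfl⟩
    have ht : t = ot ++ u := by
      simp only [List.cons_append, List.cons.injEq] at hu
      exact hu.2.symm
    have hdrop : t.drop ((oh :: ot).length - 1) = u := by simp [ht]
    rw [rep]
    simp only [hp, if_true, hdrop]
    rw [hdrop] at ih
    rw [List.map_append, ih]
    have hrhs : (c :: t).map (fun a => decide (a = '#'))
        = (oh :: ot).map (fun a => decide (a = '#')) ++ u.map (fun a => decide (a = '#')) := by
      rw [← hu]; simp
    rw [hrhs, tok_mask _ hn, tok_mask _ ho]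
  | case3 c t hp ih =>
    rw [rep]
    simp only [hp, Bool.false_eq_true, if_false, List.map_cons, ih]

theorem rep_length (o n : List Char) (ho : pvTok o) (hn : pvTok n) (t : List Char) :
    (rep o n t).length = t.length := by
  have h := congrArg List.length (rep_mask o n ho hn t)
  simpa using h

-- "no key of the table is a prefix"
def pvMiss (s : List Char) : Prop := ∀ k ∈ pvKeys, ¬ k <+: s

def pvTokB (p : List Char) : Bool := p.length == 7 && p.head? == some '#' && p.tail.all (· != '#')

theorem pvTokB_iff (p : List Char) : pvTokB p = true ↔ pvTok p := by
  simp [pvTokB, pvTok, List.all_eq_true, and_assoc]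

theorem keys_tok : ∀ k ∈ pvKeys, pvTok k := by
  intro k hk
  rw [← pvTokB_iff]
  exact List.all_eq_true.mp (by rfl : pvKeys.all pvTokB = true) k hk

-- Miss is invariant under one rep step
theorem miss_step (o n : List Char) (ho : pvTok o) (hn : pvTok n) (c : Char) (t : List Char)
    (h : pvMiss (c :: t)) : pvMiss (c :: rep o n t) := by
  intro k hk hpre
  obtain ⟨kr, rfl, hkl, hkh⟩ := tok_cons k (keys_tok k hk)
  obtain ⟨tl, htl⟩ := hpre
  simp only [List.cons_append, List.cons.injEq] at htl
  obtain ⟨hc, htl⟩ := htl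
  have hkr : kr <+: rep o n t := ⟨tl, htl⟩
  by_cases hex : ∃ i, ∃ _ : i < t.length, i < 6 ∧ t[i] = '#'
  · obtain ⟨i, hit, hi6, hihash⟩ := hex
    have hlen : (rep o n t).length = t.length := rep_length o n ho hn t
    have hmask := rep_mask o n ho hn t
    have hrep : (rep o n t)[i]'(by omega) = '#' := by
      have := congrArg (fun l => l[i]?) hmask
      simp only [List.getElem?_map] at this
      have h1 : (rep o n t)[i]? = some ((rep o n t)[i]'(by omega)) := List.getElem?_eq_getElem _
      have h2 : t[i]? = some (t[i]'hit) := List.getElem?_eq_getElem _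
      rw [h1, h2] at this
      simp only [Option.map_some, Option.some.injEq, decide_eq_decide] at this
      exact this.mpr hihash
    have hkri : kr[i]'(by omega) = '#' := by
      rw [hkr.getElem (by omega)]
      exact hrep
    exact hkh _ (List.getElem_mem _) hkri
  · push Not at hex
    by_cases hlt : t.length < 6
    · have : kr.length ≤ (rep o n t).length := hkr.length_le
      rw [rep_length o n ho hn t, hkl] at this
      omega
    · push Not at hlt
      have hy : ∀ a ∈ t.take 6, a ≠ '#' := by
        intro a ha
        obtain ⟨i, hi, rfl⟩ := List.getElem_of_mem ha
        rw [List.getElem_take]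
        exact hex i (by simp at hi; omega) (by simp at hi; omega)
      have hsplit : rep o n t = t.take 6 ++ rep o n (t.drop 6) := by
        conv_lhs => rw [← List.take_append_drop 6 t]
        exact rep_skip_block o n ho.2.1 _ _ hy
      have hkr6 : kr = t.take 6 := by
        refine prefix_append_same_length (hsplit ▸ hkr) ?_
        rw [hkl, List.length_take]
        omega
      refine h ('#' :: kr) hk ?_
      rw [hc, hkr6]
      refine ⟨t.drop 6, ?_⟩
      simp [List.take_append_drop]

-- the fold over a sub-table, at chars level
def repFold (tbl : List (List Char × List Char)) (s : List Char) : List Char :=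
  tbl.foldl (fun acc p => rep p.1 p.2 acc) s

theorem repFold_nil_input : ∀ tbl, repFold tbl [] = [] := by
  intro tbl
  induction tbl with
  | nil => rfl
  | cons p rest ih => simpa [repFold, rep_nil] using ih

theorem repFold_miss (c : Char) :
    ∀ tbl, (∀ p ∈ tbl, pvTok p.1 ∧ pvTok p.2 ∧ p.1 ∈ pvKeys) →
      ∀ t, pvMiss (c :: t) → repFold tbl (c :: t) = c :: repFold tbl t := by
  intro tbl
  induction tbl with
  | nil => intro _ t _; rfl
  | cons p rest ih =>
    intro hfacts t hmiss
    obtain ⟨hto, htn, hkm⟩ := hfacts p (by simp)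
    have hnp : ¬ p.1 <+: (c :: t) := hmiss p.1 hkm
    show repFold rest (rep p.1 p.2 (c :: t)) = c :: repFold rest (rep p.1 p.2 t)
    rw [rep_skip p.1 p.2 c t hnp]
    exact ih (fun q hq => hfacts q (by simp [hq])) (rep p.1 p.2 t)
      (miss_step p.1 p.2 hto htn c t hmiss)

theorem repFold_token_prefix (x : List Char) (hx : pvTok x) :
    ∀ tbl, (∀ p ∈ tbl, pvTok p.1 ∧ pvTok p.2 ∧ p.1 ≠ x) →
      ∀ u, repFold tbl (x ++ u) = x ++ repFold tbl u := by
  intro tbl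
  induction tbl with
  | nil => intro _ u; rfl
  | cons p rest ih =>
    intro hfacts u
    obtain ⟨hto, htn, hne⟩ := hfacts p (by simp)
    show repFold rest (rep p.1 p.2 (x ++ u)) = x ++ repFold rest (rep p.1 p.2 u)
    rw [rep_token_prefix p.1 p.2 x hto hx hne u]
    exact ih (fun q hq => hfacts q (by simp [hq])) (rep p.1 p.2 u)

-- generic dict facts
theorem get?_mk_split {κ ν : Type} [BEq κ] [LawfulBEq κ] {l : List (κ × ν)} {k : κ} {v : ν}
    (h : PySem.Dict.get? (PySem.Dict.mk l) k = some v) :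
    ∃ pre post, l = pre ++ (k, v) :: post ∧ ∀ p ∈ pre, p.1 ≠ k := by
  induction l with
  | nil => simp [PySem.Dict.get?] at h
  | cons q rest ih =>
    rw [PySem.Dict.get?_mk_cons] at h
    by_cases hq : q.1 = k
    · refine ⟨[], rest, ?_, by simp⟩
      simp only [hq, beq_self_eq_true, if_true, Option.some.injEq] at h
      simp [← hq, ← h]
    · have hbeq : (q.1 == k) = false := beq_eq_false_iff_ne.mpr hq
      rw [hbeq] at h
      simp only [Bool.false_eq_true, if_false] at h
      obtain ⟨pre, post, hsplit, hpre⟩ := ih h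
      exact ⟨q :: pre, post, by simp [hsplit], by
        intro p hp
        rcases List.mem_cons.mp hp with rfl | hp'
        · exact hq
        · exact hpre p hp'⟩

theorem mem_get?_mk {κ ν : Type} [BEq κ] [LawfulBEq κ] {l : List (κ × ν)} {k : κ} {v : ν}
    (hnd : (l.map Prod.fst).Nodup) (hmem : (k, v) ∈ l) :
    PySem.Dict.get? (PySem.Dict.mk l) k = some v := by
  induction l with
  | nil => simp at hmem
  | cons q rest ih =>
    rw [List.map_cons, List.nodup_cons] at hnd
    rw [PySem.Dict.get?_mk_cons]
    rcases List.mem_cons.mp hmem with rfl | hmem'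
    · simp
    · have hq : (q.1 == k) = false := by
        refine beq_eq_false_iff_ne.mpr ?_
        intro hqe
        exact hnd.1 (hqe ▸ List.mem_map_of_mem hmem')
      rw [hq]
      simp only [Bool.false_eq_true, if_false]
      exact ih hnd.2 hmem'

theorem pvT_tok : ∀ p ∈ pvT, pvTok p.1 ∧ pvTok p.2 := by
  intro p hp
  have h := List.all_eq_true.mp (by rfl : pvT.all (fun p => pvTokB p.1 && pvTokB p.2) = true) p hp
  simp only [Bool.and_eq_true, pvTokB_iff] at h
  exact h

set_option maxRecDepth 4000 in
theorem pvT_pairwise : pvT.Pairwise (fun p q => p.2 ≠ q.1) := by decide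

theorem pvT_facts : ∀ p ∈ pvT, pvTok p.1 ∧ pvTok p.2 ∧ p.1 ∈ pvKeys := by
  intro p hp
  exact ⟨(pvT_tok p hp).1, (pvT_tok p hp).2, List.mem_map_of_mem hp⟩

-- bridge facts between the numeric table and A's chars table
set_option maxRecDepth 4000 in
theorem pvT_eq_num : pvT = pvNumMap.map (fun p => ('#' :: pvFmt6 p.1, '#' :: pvFmt6 p.2)) := by
  decide

set_option maxRecDepth 4000 in
theorem num_nodup : (pvNumMap.map Prod.fst).Nodup := by decide

set_option maxRecDepth 4000 in
theorem pvT_nodup : (pvT.map Prod.fst).Nodup := by decide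

set_option maxRecDepth 4000 in
theorem num_parse : ∀ p ∈ pvNumMap, pvParse6 (pvFmt6 p.1) = some p.1 := by decide

set_option maxRecDepth 8000 in
theorem num_lookup : ∀ p ∈ pvNumMap,
    PySem.Dict.get? pvTableB ('#' :: pvFmt6 p.1) = some ('#' :: pvFmt6 p.2) := by decide

-- digit and 6-digit roundtrips
theorem hex_rt (c : Char) (d : Nat) (h : pvHexVal? c = some d) : d < 16 ∧ pvHexChr d = c := by
  unfold pvHexVal? at h
  split at h <;> simp_all <;> subst h <;> decide

theorem parse6_rt (l : List Char) (n : Nat) (h : pvParse6 l = some n) :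
    pvFmt6 n = l ∧ l.length = 6 := by
  unfold pvParse6 at h
  split at h
  case _ a b c d e f =>
    split at h
    case _ a' b' c' d' e' f' ha hb hc hd he hf =>
      obtain ⟨ha16, harc⟩ := hex_rt a a' ha
      obtain ⟨hb16, hbrc⟩ := hex_rt b b' hb
      obtain ⟨hc16, hcrc⟩ := hex_rt c c' hc
      obtain ⟨hd16, hdrc⟩ := hex_rt d d' hd
      obtain ⟨he16, herc⟩ := hex_rt e e' he
      obtain ⟨hf16, hfrc⟩ := hex_rt f f' hf
      simp only [Option.some.injEq] at h
      subst h
      refine ⟨?_, rfl⟩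
      unfold pvFmt6
      have e1 : (((((a' * 16 + b') * 16 + c') * 16 + d') * 16 + e') * 16 + f') / 1048576 % 16 = a' := by omega
      have e2 : (((((a' * 16 + b') * 16 + c') * 16 + d') * 16 + e') * 16 + f') / 65536 % 16 = b' := by omega
      have e3 : (((((a' * 16 + b') * 16 + c') * 16 + d') * 16 + e') * 16 + f') / 4096 % 16 = c' := by omega
      have e4 : (((((a' * 16 + b') * 16 + c') * 16 + d') * 16 + e') * 16 + f') / 256 % 16 = d' := by omega
      have e5 : (((((a' * 16 + b') * 16 + c') * 16 + d') * 16 + e') * 16 + f') / 16 % 16 = e' := by omega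
      have e6 : (((((a' * 16 + b') * 16 + c') * 16 + d') * 16 + e') * 16 + f') % 16 = f' := by omega
      rw [e1, e2, e3, e4, e5, e6, harc, hbrc, hcrc, hdrc, herc, hfrc]
    case _ => exact absurd h (by simp)
  case _ => exact absurd h (by simp)

-- B's lookup misses exactly where A's chars-table lookup misses
theorem miss_bridge (t : List Char)
    (hnone : ∀ v, pvParse6 (t.take 6) = some v → PySem.Dict.get? pvNumTable v = none) :
    PySem.Dict.get? pvTableB (('#' :: t).take 7) = none := by
  by_contra hne
  obtain ⟨v, hv⟩ := Option.ne_none_iff_exists'.mp hne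
  obtain ⟨pre, post, hsplit, _⟩ := get?_mk_split hv
  have hmem : (('#' :: t).take 7, v) ∈ pvT := by rw [hsplit]; simp
  rw [pvT_eq_num] at hmem
  obtain ⟨p, hp, hpe⟩ := List.mem_map.mp hmem
  have hk : '#' :: pvFmt6 p.1 = ('#' :: t).take 7 := congrArg Prod.fst hpe
  rw [List.take_succ_cons] at hk
  have ht6 : t.take 6 = pvFmt6 p.1 := by
    have := congrArg List.tail hk
    simpa using this.symm
  have hparse : pvParse6 (t.take 6) = some p.1 := by
    rw [ht6]; exact num_parse p hp
  have h2 : PySem.Dict.get? (PySem.Dict.mk pvNumMap) p.1 = some p.2 :=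
    mem_get?_mk num_nodup (by simpa using hp)
  have h3 : PySem.Dict.get? (PySem.Dict.mk pvNumMap) p.1 = none := hnone p.1 hparse
  rw [h2] at h3
  exact absurd h3 (by simp)

-- the main chars-level equivalence
theorem main_chars : ∀ s : List Char, repFold pvT s = pvScanB s := by
  intro s
  induction s using pvScanB.induct with
  | case1 => rw [repFold_nil_input, pvScanB]
  | case2 t v hparse w hget ih =>
    have hget' : PySem.Dict.get? (PySem.Dict.mk pvNumMap) v = some w := hget
    obtain ⟨pre0, post0, hsplit0, _⟩ := get?_mk_split hget'
    have hmemn : (v, w) ∈ pvNumMap := by rw [hsplit0]; simp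
    obtain ⟨hfmt, hlen6⟩ := parse6_rt (t.take 6) v hparse
    have hget7 : PySem.Dict.get? pvTableB (('#' :: t).take 7) = some ('#' :: pvFmt6 w) := by
      rw [List.take_succ_cons, ← hfmt]
      exact num_lookup (v, w) hmemn
    obtain ⟨pre, post, hsplit, hpre⟩ := get?_mk_split hget7
    have hmemk : (('#' :: t).take 7, '#' :: pvFmt6 w) ∈ pvT := by rw [hsplit]; simp
    obtain ⟨htokk, htokv⟩ := pvT_tok _ hmemk
    have hkne : ('#' :: t).take 7 ≠ [] := by
      intro h0; have := htokk.1; rw [h0] at this; simp at this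
    have hsu : ('#' :: t).take 7 ++ ('#' :: t).drop 7 = '#' :: t := List.take_append_drop _ _
    have hfold : ∀ x, repFold pvT x
        = repFold post (rep (('#' :: t).take 7) ('#' :: pvFmt6 w) (repFold pre x)) := by
      intro x; rw [hsplit]; simp [repFold, List.foldl_append]
    have hprefacts : ∀ p ∈ pre, pvTok p.1 ∧ pvTok p.2 ∧ p.1 ≠ ('#' :: t).take 7 := by
      intro p hp
      have hmem : p ∈ pvT := by rw [hsplit]; exact List.mem_append_left _ hp
      exact ⟨(pvT_tok p hmem).1, (pvT_tok p hmem).2, hpre p hp⟩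
    have hpostne : ∀ p ∈ post, pvTok p.1 ∧ pvTok p.2 ∧ p.1 ≠ '#' :: pvFmt6 w := by
      intro p hp
      have hmem : p ∈ pvT := by
        rw [hsplit]; exact List.mem_append_right _ (List.mem_cons_of_mem _ hp)
      have hpw := pvT_pairwise
      rw [hsplit] at hpw
      have h2 := (List.pairwise_append.mp hpw).2.1
      have h3 := (List.pairwise_cons.mp h2).1 p hp
      exact ⟨(pvT_tok p hmem).1, (pvT_tok p hmem).2, fun he => h3 he.symm⟩
    rw [hfold ('#' :: t)]
    have h2 : repFold pre ('#' :: t)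
        = ('#' :: t).take 7 ++ repFold pre (('#' :: t).drop 7) := by
      conv_lhs => rw [← hsu]
      exact repFold_token_prefix _ htokk pre hprefacts _
    have hdrop : ('#' :: t).drop 7 = t.drop 6 := by simp
    rw [h2, rep_hit _ ('#' :: pvFmt6 w) hkne,
      repFold_token_prefix _ htokv post hpostne, ← hfold, hdrop, ih]
    rw [pvScanB]
    simp [hparse, hget]
  | case3 t v hparse hget ih =>
    have hget7 : PySem.Dict.get? pvTableB (('#' :: t).take 7) = none := by
      refine miss_bridge t ?_
      intro v' hv
      rw [hv] at hparse
      cases hparse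
      exact hget
    have hmiss : pvMiss ('#' :: t) := by
      intro k hk hkpre
      have htok := keys_tok k hk
      have hk7 : k = ('#' :: t).take 7 := by
        rw [List.prefix_iff_eq_take] at hkpre
        rw [hkpre, htok.1]
      obtain ⟨vv, hvmem⟩ : ∃ vv, (k, vv) ∈ pvT := by
        obtain ⟨p, hp, hpe⟩ := List.mem_map.mp hk
        exact ⟨p.2, by rw [← hpe]; exact hp⟩
      have h4 : PySem.Dict.get? pvTableB k = some vv := mem_get?_mk pvT_nodup hvmem
      rw [hk7, hget7] at h4
      exact absurd h4 (by simp)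
    rw [repFold_miss '#' pvT pvT_facts t hmiss, ih, pvScanB]
    simp [hparse, hget]
  | case4 t hparse ih =>
    have hget7 : PySem.Dict.get? pvTableB (('#' :: t).take 7) = none := by
      refine miss_bridge t ?_
      intro v hv
      rw [hv] at hparse
      cases hparse
    have hmiss : pvMiss ('#' :: t) := by
      intro k hk hkpre
      have htok := keys_tok k hk
      have hk7 : k = ('#' :: t).take 7 := by
        rw [List.prefix_iff_eq_take] at hkpre
        rw [hkpre, htok.1]
      obtain ⟨vv, hvmem⟩ : ∃ vv, (k, vv) ∈ pvT := by
        obtain ⟨p, hp, hpe⟩ := List.mem_map.mp hk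
        exact ⟨p.2, by rw [← hpe]; exact hp⟩
      have h4 : PySem.Dict.get? pvTableB k = some vv := mem_get?_mk pvT_nodup hvmem
      rw [hk7, hget7] at h4
      exact absurd h4 (by simp)
    rw [repFold_miss '#' pvT pvT_facts t hmiss, ih, pvScanB]
    simp [hparse]
  | case5 c t hc ih =>
    have hmiss : pvMiss (c :: t) := by
      intro k hk hkpre
      obtain ⟨kr, rfl, _, _⟩ := tok_cons k (keys_tok k hk)
      obtain ⟨tl, htl⟩ := hkpre
      simp only [List.cons_append, List.cons.injEq] at htl
      exact hc htl.1.symm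
    rw [repFold_miss c pvT pvT_facts t hmiss, ih, pvScanB]
    simp [hc]

-- bridge: A's String-level fold equals the chars-level fold
theorem foldA_toList : ∀ (l : List (String × String)), (∀ p ∈ l, p.1.toList ≠ []) →
    ∀ s : String, (l.foldl (fun light p => PySem.Str.replace light p.1 p.2) s).toList
      = repFold (l.map (fun p => (p.1.toList, p.2.toList))) s.toList := by
  intro l
  induction l with
  | nil => intro _ s; rfl
  | cons p rest ih =>
    intro hne s
    rw [List.foldl_cons, ih (fun q hq => hne q (by simp [hq])) _, List.map_cons]
    show repFold _ (PySem.Str.replace s p.1 p.2).toList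
      = repFold _ (rep p.1.toList p.2.toList s.toList)
    rw [PySem.Str.toList_replace, replace_eq_rep _ _ (hne p (by simp)) _]

-- ===== VERDICT (by name: the statement is the Claim_ definition above) =====
theorem build_light_stylesheet_spec : Claim_equal_build_light_stylesheet := by
  intro s _
  unfold Spec_build_light_stylesheet build_light_stylesheet build_light_stylesheet_alt
  have hne : ∀ p ∈ pvReplacements, p.1.toList ≠ [] := by
    intro p hp h0
    have hmem : (p.1.toList, p.2.toList) ∈ pvT := List.mem_map_of_mem hp
    have := (pvT_tok _ hmem).1.1
    rw [h0] at this
    simp at this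
  apply String.toList_inj.mp
  rw [String.toList_ofList, foldA_toList pvReplacements hne s]
  exact main_chars s.toList
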